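-- pv_equiv track=rewrite | github.com/AfterHell/CSE337 | HW1/py3_Jia_Chen_111118311/q5_p1.py | has3IncreasingChars
-- ===== SOURCE A (Python) =====
-- def has3IncreasingChars(string):
-- 	first = ''
-- 	second = ''
--
-- 	count = 0
-- 	for char in string:
-- 		if(count == 0):
-- 			first = char
--
-- 		elif(count == 1):
-- 			second = char
--
-- 		else:
-- 			if((first.isdigit() == True and second.isdigit() == True and char.isdigit() == True)
-- 			or((first.isalpha() == True and second.isalpha() == True and char.isalpha() == True))):
-- 				#compare here
-- 				if(ord(first) + 2 == ord(second) + 1 == ord(char)):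
-- 					return True
-- 			else:
-- 				pass
--
-- 			first = second
-- 			second = char
--
--
-- 		count += 1
-- 	return False
-- ===== SOURCE B (Python) =====
-- def has3IncreasingChars(string):
--     run = 1
--     for prev, cur in zip(string, string[1:]):
--         if ((prev.isdigit() and cur.isdigit()) or (prev.isalpha() and cur.isalpha())) and ord(cur) == ord(prev) + 1:
--             run += 1
--             if run == 3:
--                 return True
--         else:
--             run = 1
--     return False
-- ===== Notes on version B (the rewrite author's own statement) =====
-- stated objective: simpler
-- what changed: Replaces A's buffered two-character sliding window (first/second/count state with manual shifting) by a single run-length counter over adjacent character pairs that resets on any break and returns once the run reaches 3.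
import Mathlib
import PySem

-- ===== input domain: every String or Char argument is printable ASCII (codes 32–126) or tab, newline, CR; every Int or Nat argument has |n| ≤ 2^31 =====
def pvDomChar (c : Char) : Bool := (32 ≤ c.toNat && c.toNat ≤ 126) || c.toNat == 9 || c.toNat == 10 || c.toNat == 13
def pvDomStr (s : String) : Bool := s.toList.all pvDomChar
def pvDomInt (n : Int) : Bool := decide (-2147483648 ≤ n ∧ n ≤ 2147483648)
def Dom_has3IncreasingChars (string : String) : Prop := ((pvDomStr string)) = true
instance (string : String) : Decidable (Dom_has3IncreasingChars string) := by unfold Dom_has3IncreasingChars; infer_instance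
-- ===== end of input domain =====

-- B replaces A's buffered two-character sliding window by a run-length counter over adjacent pairs (simpler state, same single pass).

-- ===== PORT A =====
-- A's triple test: all three digits or all three alpha (the two big 'and' chains of the Python 'if').
def pvTypeOk3 (first second char : Char) : Bool :=
  (PySem.Chars.isdigit first && PySem.Chars.isdigit second && PySem.Chars.isdigit char)
    || (PySem.Chars.isalpha first && PySem.Chars.isalpha second && PySem.Chars.isalpha char)

-- A's chained comparison 'ord(first) + 2 == ord(second) + 1 == ord(char)'.
def pvOrdOk3 (first second char : Char) : Bool :=
  decide ((first.toNat : Int) + 2 = (second.toNat : Int) + 1)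
    && decide ((second.toNat : Int) + 1 = (char.toNat : Int))

-- A's for-loop: state (first, second, count), one step per character.
def pvLoopA (first second : Char) (count : Int) (l : List Char) : Bool :=
  match l with
  | [] => false
  | c :: rest =>
    if count = 0 then pvLoopA c second (count + 1) rest
    else if count = 1 then pvLoopA first c (count + 1) rest
    else
      if pvTypeOk3 first second c then
        if pvOrdOk3 first second c then true
        else pvLoopA second c (count + 1) rest
      else pvLoopA second c (count + 1) rest

-- Python initializes first/second to ''; they are only read once count ≥ 2, by which point
-- both have been assigned a character, so a dummy ' ' stands in for the never-read ''.
def has3IncreasingChars (string : String) : Bool :=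
  pvLoopA ' ' ' ' 0 string.toList

-- ===== PORT B =====
-- B's pair test: prev,cur same type (digit/alpha) and cur is the next code point.
def pvGoodPair (prev cur : Char) : Bool :=
  ((PySem.Chars.isdigit prev && PySem.Chars.isdigit cur)
      || (PySem.Chars.isalpha prev && PySem.Chars.isalpha cur))
    && decide ((cur.toNat : Int) = (prev.toNat : Int) + 1)

-- B's for-loop over zip(string, string[1:]): state (prev, run), early return at run == 3.
def pvLoopB (prev : Char) (run : Int) (l : List Char) : Bool :=
  match l with
  | [] => false
  | cur :: rest =>
    if pvGoodPair prev cur then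
      if run + 1 = 3 then true else pvLoopB cur (run + 1) rest
    else pvLoopB cur 1 rest

def has3IncreasingChars_alt (string : String) : Bool :=
  match string.toList with
  | [] => false
  | p :: rest => pvLoopB p 1 rest

-- ===== PRECONDITION & SPEC =====
def Spec_has3IncreasingChars (string : String) (out : Bool) : Prop := out = has3IncreasingChars_alt string
instance (string : String) (out : Bool) : Decidable (Spec_has3IncreasingChars string out) := by unfold Spec_has3IncreasingChars; infer_instance

-- ===== CLAIM (what is proved, stated in full; the proofs are below) =====
def Claim_equal_has3IncreasingChars : Prop := ∀ (string : String), Dom_has3IncreasingChars string → Spec_has3IncreasingChars string (has3IncreasingChars string)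

-- ===== LEMMAS AND PROOFS =====

-- no character is both a digit and a letter
lemma pv_not_digit_and_alpha (c : Char) :
    ¬(PySem.Chars.isdigit c = true ∧ PySem.Chars.isalpha c = true) := by
  unfold PySem.Chars.isdigit PySem.Chars.isalpha PySem.Chars.isupper PySem.Chars.islower
  simp [Char.le_def, UInt32.le_iff_toNat_le]
  omega

-- A's triple test equals the conjunction of B's two pair tests
lemma pv_triple_eq_pairs (f s c : Char) :
    (pvTypeOk3 f s c = true ∧ pvOrdOk3 f s c = true)
      ↔ (pvGoodPair f s = true ∧ pvGoodPair s c = true) := by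
  have hf := pv_not_digit_and_alpha f
  have hs := pv_not_digit_and_alpha s
  have hc := pv_not_digit_and_alpha c
  unfold pvTypeOk3 pvOrdOk3 pvGoodPair
  cases hdf : PySem.Chars.isdigit f <;> cases hds : PySem.Chars.isdigit s <;>
    cases hdc : PySem.Chars.isdigit c <;> cases haf : PySem.Chars.isalpha f <;>
    cases has : PySem.Chars.isalpha s <;> cases hac : PySem.Chars.isalpha c <;>
    simp_all <;> omega

lemma pv_if_collapse (t o : Bool) (x : Bool) (h : ¬(t = true ∧ o = true)) :
    (if t = true then (if o = true then true else x) else x) = x := by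
  cases t <;> cases o <;> simp_all

-- the heart: A's window loop equals B's run-counter loop once two characters are buffered
lemma pv_loopA_eq_loopB (l : List Char) (f s : Char) (count : Int) (h : 2 ≤ count) :
    pvLoopA f s count l = pvLoopB s (if pvGoodPair f s then 2 else 1) l := by
  induction l generalizing f s count with
  | nil => simp [pvLoopA, pvLoopB]
  | cons c rest ih =>
    rw [pvLoopA, pvLoopB]
    rw [if_neg (by omega : ¬ count = 0), if_neg (by omega : ¬ count = 1)]
    have ih' := ih s c (count + 1) (by omega)
    by_cases hfs : pvGoodPair f s = true
    · by_cases hsc : pvGoodPair s c = true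
      · have h3 := (pv_triple_eq_pairs f s c).mpr ⟨hfs, hsc⟩
        simp [hfs, hsc, h3.1, h3.2]
      · have h3 : ¬(pvTypeOk3 f s c = true ∧ pvOrdOk3 f s c = true) := fun h =>
          hsc ((pv_triple_eq_pairs f s c).mp h).2
        rw [pv_if_collapse _ _ _ h3, ih']
        simp [hsc]
    · by_cases hsc : pvGoodPair s c = true
      · have h3 : ¬(pvTypeOk3 f s c = true ∧ pvOrdOk3 f s c = true) := fun h =>
          hfs ((pv_triple_eq_pairs f s c).mp h).1
        rw [pv_if_collapse _ _ _ h3, ih']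
        simp [hfs, hsc]
      · have h3 : ¬(pvTypeOk3 f s c = true ∧ pvOrdOk3 f s c = true) := fun h =>
          hfs ((pv_triple_eq_pairs f s c).mp h).1
        rw [pv_if_collapse _ _ _ h3, ih']
        simp [hsc]

-- ===== VERDICT (by name: the statement is the Claim_ definition above) =====
theorem has3IncreasingChars_spec : Claim_equal_has3IncreasingChars := by
  intro string _
  unfold Spec_has3IncreasingChars has3IncreasingChars has3IncreasingChars_alt
  match hl : string.toList with
  | [] => simp [pvLoopA]
  | [a] => simp [pvLoopA, pvLoopB]
  | a :: b :: rest =>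
    have h1 : pvLoopA ' ' ' ' 0 (a :: b :: rest) = pvLoopA a ' ' 1 (b :: rest) := by
      rw [pvLoopA]; norm_num
    have h2 : pvLoopA a ' ' 1 (b :: rest) = pvLoopA a b 2 rest := by
      rw [pvLoopA]; norm_num
    rw [h1, h2, pv_loopA_eq_loopB rest a b 2 (by omega)]
    by_cases hab : pvGoodPair a b = true <;> simp [pvLoopB, hab]
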